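-- pv_equiv track=rewrite | github.com/andy2167565/leetcode | Hard/0828_count-unique-characters-of-all-substrings-of-a-given-string/count-unique-characters-of-all-substrings-of-a-given-string.py | uniqueLetterString
-- ===== SOURCE A (Python) =====
-- def uniqueLetterString(s: str) -> int:
--     # Reference: https://leetcode.com/problems/count-unique-characters-of-all-substrings-of-a-given-string/solutions/128952/java-c-python-one-pass-o-n/
--     import collections
--     ans, index = 0, collections.defaultdict(lambda: (-1, -1))
--     for i, c in enumerate(s):
--         second_prev, prev = index[c]  # Track indices of last two occurrences
--         ans += (i - prev) * (prev - second_prev)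
--         index[c] = (prev, i)
--     for second_prev, prev in index.values():
--         ans += (len(s) - prev) * (prev - second_prev)
--     return ans
-- ===== SOURCE B (Python) =====
-- def uniqueLetterString(s: str) -> int:
--     n = len(s)
--     pos = {}
--     for i, c in enumerate(s):
--         pos.setdefault(c, []).append(i)
--     ans = 0
--     for ps in pos.values():
--         prev = -1
--         for p, nxt in zip(ps, ps[1:] + [n]):
--             ans += (p - prev) * (nxt - p)
--             prev = p
--     return ans
-- ===== Notes on version B (the rewrite author's own statement) =====
-- stated objective: alternative
-- what changed: B replaces A's streaming last-two-occurrence tracker (with a post-loop over residual dict state) by a group-by-character pass: it builds each character's ordered position list once, then sums (p - prev) * (next - p) per occurrence with -1/len(s) sentinels.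
import Mathlib
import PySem

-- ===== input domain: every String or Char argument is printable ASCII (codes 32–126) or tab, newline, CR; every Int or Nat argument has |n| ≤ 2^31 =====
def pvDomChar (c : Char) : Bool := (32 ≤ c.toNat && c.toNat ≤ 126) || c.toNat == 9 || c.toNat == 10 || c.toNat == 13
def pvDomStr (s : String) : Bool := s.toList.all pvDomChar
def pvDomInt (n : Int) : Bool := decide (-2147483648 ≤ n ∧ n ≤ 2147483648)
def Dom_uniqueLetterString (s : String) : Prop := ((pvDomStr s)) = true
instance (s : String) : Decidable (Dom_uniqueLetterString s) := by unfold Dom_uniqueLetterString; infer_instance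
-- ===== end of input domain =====

-- B groups positions by character and sums (p - prev) * (next - p) per occurrence,
-- replacing A's streaming last-two-occurrence tracker; alternative decomposition, same cost.

-- ===== PORT A =====
def uniqueLetterString (s : String) : Int :=
  let st := (PySem.List.enumerate s.toList 0).foldl
      (fun (st : Int × PySem.Dict Char (Int × Int)) ic =>
        let pr := st.2.getD ic.2 (-1, -1)
        (st.1 + (ic.1 - pr.2) * (pr.2 - pr.1), st.2.insert ic.2 (pr.2, ic.1)))
      (0, PySem.Dict.empty)
  st.2.values.foldl (fun ans pr => ans + (PySem.Str.len s - pr.2) * (pr.2 - pr.1)) st.1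

-- ===== PORT B =====
def uniqueLetterString_alt (s : String) : Int :=
  let n := PySem.Str.len s
  let pos := (PySem.List.enumerate s.toList 0).foldl
      (fun (d : PySem.Dict Char (List Int)) ic => d.modify ic.2 [] (fun ps => ps ++ [ic.1]))
      PySem.Dict.empty
  pos.values.foldl
    (fun ans ps =>
      ((ps.zip (PySem.List.slice ps (some 1) none ++ [n])).foldl
        (fun (st : Int × Int) pn => (st.1 + (pn.1 - st.2) * (pn.2 - pn.1), pn.1))
        (ans, -1)).1)
    0

-- ===== PRECONDITION & SPEC =====
def Spec_uniqueLetterString (s : String) (out : Int) : Prop := out = uniqueLetterString_alt s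
instance (s : String) (out : Int) : Decidable (Spec_uniqueLetterString s out) := by unfold Spec_uniqueLetterString; infer_instance

-- ===== CLAIM (what is proved, stated in full; the proofs are below) =====
def Claim_equal_uniqueLetterString : Prop := ∀ (s : String), Dom_uniqueLetterString s → Spec_uniqueLetterString s (uniqueLetterString s)

-- ===== LEMMAS AND PROOFS =====

-- last two elements of a position list, with accumulator padding ((-1,-1) at the start)
def pvLt2 : Int → Int → List Int → Int × Int
  | sp, prev, [] => (sp, prev)
  | _, prev, p :: rest => pvLt2 prev p rest

-- sum of (p - prev)*(next - p) over elements of the list that have a next inside the list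
def pvInner : Int → List Int → Int
  | _, [] => 0
  | _, [_] => 0
  | prev, p :: q :: rest => (p - prev) * (q - p) + pvInner p (q :: rest)

-- B's per-character sum: the "next" of the last element is the sentinel n
def pvBsum (n : Int) : Int → List Int → Int
  | _, [] => 0
  | prev, p :: rest => (p - prev) * (rest.headD n - p) + pvBsum n p rest

-- A's dict is the image of B's positions dict under "last two positions"
def pvProj (l : List (Char × List Int)) : List (Char × (Int × Int)) :=
  l.map (fun p => (p.1, pvLt2 (-1) (-1) p.2))

-- A's running answer is the sum of the inner contributions of B's position lists
def pvSumInner (l : List (Char × List Int)) : Int :=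
  (l.map (fun p => pvInner (-1) p.2)).sum

theorem pvLt2_snoc (ps : List Int) : ∀ sp prev i, pvLt2 sp prev (ps ++ [i]) = ((pvLt2 sp prev ps).2, i) := by
  induction ps with
  | nil => intro sp prev i; rfl
  | cons p rest ih => intro sp prev i; simpa [pvLt2] using ih prev p i

theorem pvInner_snoc_gen (ps : List Int) : ∀ sp prev i, ps ≠ [] →
    pvInner prev (ps ++ [i]) =
      pvInner prev ps + (i - (pvLt2 sp prev ps).2) * ((pvLt2 sp prev ps).2 - (pvLt2 sp prev ps).1) := by
  induction ps with
  | nil => intro _ _ _ h; exact absurd rfl h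
  | cons p rest ih =>
    intro sp prev i _
    cases rest with
    | nil => simp [pvInner, pvLt2]; ring
    | cons q r =>
      have h := ih prev p i (by simp)
      simp only [List.cons_append, pvInner, pvLt2] at h ⊢
      rw [h]; ring

theorem pvInner_snoc (ps : List Int) (i : Int) :
    pvInner (-1) (ps ++ [i]) =
      pvInner (-1) ps + (i - (pvLt2 (-1) (-1) ps).2) * ((pvLt2 (-1) (-1) ps).2 - (pvLt2 (-1) (-1) ps).1) := by
  cases ps with
  | nil => simp [pvInner, pvLt2]
  | cons p rest => exact pvInner_snoc_gen _ _ _ _ (by simp)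

theorem pvBsum_eq_gen (ps : List Int) : ∀ sp prev n, ps ≠ [] →
    pvBsum n prev ps =
      pvInner prev ps + (n - (pvLt2 sp prev ps).2) * ((pvLt2 sp prev ps).2 - (pvLt2 sp prev ps).1) := by
  induction ps with
  | nil => intro _ _ _ h; exact absurd rfl h
  | cons p rest ih =>
    intro sp prev n _
    cases rest with
    | nil => simp [pvBsum, pvInner, pvLt2]; ring
    | cons q r =>
      have h := ih prev p n (by simp)
      simp only [pvBsum, pvInner, pvLt2, List.headD] at h ⊢
      rw [h]; ring

theorem pvBsum_eq (ps : List Int) (n : Int) :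
    pvBsum n (-1) ps =
      pvInner (-1) ps + (n - (pvLt2 (-1) (-1) ps).2) * ((pvLt2 (-1) (-1) ps).2 - (pvLt2 (-1) (-1) ps).1) := by
  cases ps with
  | nil => simp [pvBsum, pvInner, pvLt2]
  | cons p rest => exact pvBsum_eq_gen _ _ _ _ (by simp)

theorem pvFind?_proj (l : List (Char × List Int)) (c : Char) :
    (pvProj l).find? (fun p => p.1 == c) =
      (l.find? (fun p => p.1 == c)).map (fun p => (p.1, pvLt2 (-1) (-1) p.2)) := by
  induction l with
  | nil => rfl
  | cons p rest ih =>
    by_cases h : p.1 = c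
    · simp [pvProj, h]
    · simp [pvProj, h] at ih ⊢; exact ih

theorem pvGet?_proj (l : List (Char × List Int)) (c : Char) :
    (PySem.Dict.mk (pvProj l)).get? c =
      ((PySem.Dict.mk l).get? c).map (fun ps => pvLt2 (-1) (-1) ps) := by
  simp only [PySem.Dict.get?, pvFind?_proj]
  cases l.find? (fun p => p.1 == c) <;> rfl

theorem pvGetD_proj (l : List (Char × List Int)) (c : Char) :
    (PySem.Dict.mk (pvProj l)).getD c (-1, -1) = pvLt2 (-1) (-1) ((PySem.Dict.mk l).getD c []) := by
  rw [PySem.Dict.getD_eq_get?_getD, PySem.Dict.getD_eq_get?_getD, pvGet?_proj]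
  cases (PySem.Dict.mk l).get? c with
  | none => rfl
  | some ps => rfl

theorem pvContains_proj (l : List (Char × List Int)) (c : Char) :
    (PySem.Dict.mk (pvProj l)).contains c = (PySem.Dict.mk l).contains c := by
  show (pvProj l).any (fun p => p.1 == c) = l.any (fun p => p.1 == c)
  simp only [pvProj, List.any_map]
  have hcomp : ((fun p : Char × (Int × Int) => p.1 == c) ∘ fun p : Char × List Int => (p.1, pvLt2 (-1) (-1) p.2)) =
      (fun p : Char × List Int => p.1 == c) := funext fun p => rfl
  rw [hcomp]

theorem pvProj_insert (l : List (Char × List Int)) (c : Char) (w : List Int) :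
    pvProj ((PySem.Dict.mk l).insert c w).items =
      ((PySem.Dict.mk (pvProj l)).insert c (pvLt2 (-1) (-1) w)).items := by
  rw [PySem.Dict.items_insert, PySem.Dict.items_insert, pvContains_proj]
  by_cases h : (PySem.Dict.mk l).contains c = true
  · rw [if_pos h, if_pos h]
    show pvProj (l.map _) = (pvProj l).map _
    simp only [pvProj, List.map_map]
    refine List.map_congr_left (fun p _ => ?_)
    by_cases hp : p.1 = c <;> simp [hp]
  · rw [if_neg h, if_neg h]
    show pvProj (l ++ [(c, w)]) = pvProj l ++ [(c, pvLt2 (-1) (-1) w)]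
    simp [pvProj]

theorem pvSumInner_replace (l : List (Char × List Int)) (c : Char) (v w : List Int)
    (hk : (l.map Prod.fst).Nodup) (hf : (c, v) ∈ l) :
    pvSumInner (l.map (fun p => if p.1 == c then (c, w) else p)) =
      pvSumInner l - pvInner (-1) v + pvInner (-1) w := by
  induction l with
  | nil => simp at hf
  | cons p rest ih =>
    simp only [List.map_cons, List.nodup_cons] at hk
    rcases List.mem_cons.mp hf with h1 | h1
    · subst h1
      simp only [pvSumInner, List.map_cons, List.sum_cons, beq_self_eq_true, if_true]
      have hrest : rest.map (fun p => if p.1 == c then (c, w) else p) = rest.map id := by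
        refine List.map_congr_left (fun q hq => ?_)
        have hq1 : q.1 ≠ c := by
          intro hqc
          have hm := List.mem_map_of_mem (f := Prod.fst) hq
          rw [hqc] at hm
          exact hk.1 hm
        simp [hq1]
      rw [hrest, List.map_id]; ring
    · have hpc : p.1 ≠ c := by
        intro hpc
        exact hk.1 (hpc ▸ (List.mem_map_of_mem h1 : (c, v).1 ∈ rest.map Prod.fst))
      have hif : (if p.1 == c then (c, w) else p) = p := by simp [hpc]
      simp only [pvSumInner, List.map_cons, List.sum_cons, hif]
      have h2 := ih hk.2 h1
      simp only [pvSumInner] at h2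
      rw [h2]; ring

theorem pvSumInner_insert (l : List (Char × List Int)) (c : Char) (w : List Int)
    (hk : (l.map Prod.fst).Nodup) :
    pvSumInner ((PySem.Dict.mk l).insert c w).items =
      pvSumInner l + pvInner (-1) w - pvInner (-1) ((PySem.Dict.mk l).getD c []) := by
  rw [PySem.Dict.items_insert]
  by_cases h : (PySem.Dict.mk l).contains c = true
  · rw [if_pos h]
    simp only [PySem.Dict.contains, List.any_eq_true] at h
    obtain ⟨p, hp, hpc⟩ := h
    have hpc' : p.1 = c := by simpa using hpc
    have hpl : (c, p.2) ∈ l := by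
      have : (p.1, p.2) ∈ l := by simpa using hp
      rwa [hpc'] at this
    have hgd : (PySem.Dict.mk l).getD c [] = p.2 :=
      PySem.Dict.getD_of_mem_items (PySem.Dict.mk l) (by exact hpl) (by exact hk) []
    rw [hgd]
    show pvSumInner (l.map (fun p => if p.1 == c then (c, w) else p)) = _
    rw [pvSumInner_replace l c p.2 w hk hpl]
    ring
  · rw [if_neg h]
    have hgd : (PySem.Dict.mk l).getD c [] = [] :=
      PySem.Dict.getD_of_not_contains (PySem.Dict.mk l) [] (Bool.eq_false_iff.mpr h)
    rw [hgd]
    show pvSumInner (l ++ [(c, w)]) = _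
    simp [pvSumInner, pvInner]

theorem pvCouple (e : List (Int × Char)) : ∀ (l : List (Char × List Int)) (a : Int), (l.map Prod.fst).Nodup →
    e.foldl
      (fun (st : Int × PySem.Dict Char (Int × Int)) ic =>
        let pr := st.2.getD ic.2 (-1, -1)
        (st.1 + (ic.1 - pr.2) * (pr.2 - pr.1), st.2.insert ic.2 (pr.2, ic.1)))
      (pvSumInner l + a, PySem.Dict.mk (pvProj l)) =
    (pvSumInner (e.foldl (fun d ic => d.modify ic.2 [] (fun ps => ps ++ [ic.1])) (PySem.Dict.mk l)).items + a,
      PySem.Dict.mk (pvProj (e.foldl (fun d ic => d.modify ic.2 [] (fun ps => ps ++ [ic.1])) (PySem.Dict.mk l)).items)) := by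
  induction e with
  | nil => intro l a _; rfl
  | cons ic rest ih =>
    intro l a hk
    obtain ⟨i, c⟩ := ic
    simp only [List.foldl_cons]
    rw [pvGetD_proj]
    have hmod : (PySem.Dict.mk l).modify c [] (fun ps => ps ++ [i]) =
        (PySem.Dict.mk l).insert c ((PySem.Dict.mk l).getD c [] ++ [i]) := rfl
    have hsum : pvSumInner l + a +
        (i - (pvLt2 (-1) (-1) ((PySem.Dict.mk l).getD c [])).2) *
          ((pvLt2 (-1) (-1) ((PySem.Dict.mk l).getD c [])).2 -
            (pvLt2 (-1) (-1) ((PySem.Dict.mk l).getD c [])).1) =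
        pvSumInner ((PySem.Dict.mk l).modify c [] (fun ps => ps ++ [i])).items + a := by
      rw [hmod, pvSumInner_insert l c _ hk, pvInner_snoc]; ring
    have hdict : (PySem.Dict.mk (pvProj l)).insert c
          ((pvLt2 (-1) (-1) ((PySem.Dict.mk l).getD c [])).2, i) =
        PySem.Dict.mk (pvProj ((PySem.Dict.mk l).modify c [] (fun ps => ps ++ [i])).items) := by
      apply PySem.Dict.ext
      rw [hmod, pvProj_insert, pvLt2_snoc]
    rw [hsum, hdict]
    have hknew : ((((PySem.Dict.mk l).modify c [] (fun ps => ps ++ [i])).items).map Prod.fst).Nodup :=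
      PySem.Dict.nodup_keys_insert (PySem.Dict.mk l) c _ (by exact hk)
    have := ih ((PySem.Dict.mk l).modify c [] (fun ps => ps ++ [i])).items a hknew
    simpa using this

def pvLastD : Int → List Int → Int
  | prev, [] => prev
  | _, p :: rest => pvLastD p rest

theorem pvZipFold (n : Int) : ∀ (ps : List Int) (a prev : Int),
    (ps.zip (ps.tail ++ [n])).foldl
        (fun (st : Int × Int) pn => (st.1 + (pn.1 - st.2) * (pn.2 - pn.1), pn.1)) (a, prev)
      = (a + pvBsum n prev ps, pvLastD prev ps) := by
  intro ps
  induction ps with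
  | nil => intro a prev; simp [pvBsum, pvLastD]
  | cons p rest ih =>
    intro a prev
    cases rest with
    | nil => simp [pvBsum, pvLastD, List.headD]
    | cons q r =>
      simp only [List.tail_cons, List.cons_append, List.zip_cons_cons, List.foldl_cons]
      have := ih (a + (p - prev) * (q - p)) p
      simp only [List.tail_cons] at this
      rw [this]
      simp only [pvBsum, pvLastD, List.headD]
      simp only [Prod.mk.injEq]
      exact ⟨by ring, trivial⟩

theorem pvMain (s : String) : uniqueLetterString s = uniqueLetterString_alt s := by
  have hc := pvCouple (PySem.List.enumerate s.toList 0) [] 0 (by simp)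
  simp only [pvSumInner, pvProj, List.map_nil, List.sum_nil, add_zero] at hc
  simp only [uniqueLetterString, uniqueLetterString_alt, PySem.List.slice_from_one]
  rw [show (PySem.Dict.empty : PySem.Dict Char (Int × Int)) = PySem.Dict.mk [] from rfl,
      show (PySem.Dict.empty : PySem.Dict Char (List Int)) = PySem.Dict.mk [] from rfl,
      hc]
  set n := PySem.Str.len s with hn
  set D := (PySem.List.enumerate s.toList 0).foldl
      (fun d ic => d.modify ic.2 [] fun ps => ps ++ [ic.1])
      (PySem.Dict.mk ([] : List (Char × List Int))) with hD
  have hfun : (fun (ans : Int) (ps : List Int) =>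
        ((ps.zip (ps.tail ++ [n])).foldl
          (fun (st : Int × Int) pn => (st.1 + (pn.1 - st.2) * (pn.2 - pn.1), pn.1)) (ans, -1)).1) =
      fun (ans : Int) (ps : List Int) => ans + pvBsum n (-1) ps := by
    funext ans ps
    rw [pvZipFold]
  rw [hfun]
  dsimp only
  simp only [PySem.Dict.values]
  rw [PySem.List.foldl_add, PySem.List.foldl_add]
  simp only [List.map_map, Function.comp_def]
  have hright : D.items.map (fun p => pvBsum n (-1) p.2) =
      D.items.map (fun p => pvInner (-1) p.2 +
        (n - (pvLt2 (-1) (-1) p.2).2) * ((pvLt2 (-1) (-1) p.2).2 - (pvLt2 (-1) (-1) p.2).1)) :=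
    List.map_congr_left (fun p _ => pvBsum_eq p.2 n)
  rw [hright, PySem.List.sum_map_add_int]
  ring

-- ===== VERDICT (by name: the statement is the Claim_ definition above) =====
theorem uniqueLetterString_spec : Claim_equal_uniqueLetterString := by
  intro s _
  unfold Spec_uniqueLetterString
  exact pvMain s
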